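-- pv_equiv track=rewrite | github.com/Lexyyaa/algorithm-deep-dive | python/algorithm/towpointer/programmers_132265.py | solution
-- ===== SOURCE A (Python) =====
-- from collections import Counter
--
-- def solution(topping):
--     # 오른쪽(전체)에 있는 토핑 개수 카운트
--     right = Counter(topping)
--     # 오른쪽 토핑 - 종류 수
--     right_kinds = len(right)
--
--     # 왼쪽 토핑 - 종류만 관리
--     left = set()
--     answer = 0
--
--     # 마지막에서 자르면 오른쪽이 비므로(len-1까지 이동) 컷은 len-2까지만 의미 있음
--     for i in range(len(topping) - 1):
--         t = topping[i]
--
--         # i번째 토핑을 오른쪽에서 왼쪽으로 "이동"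
--         left.add(t)
--
--         right[t] -= 1
--         if right[t] == 0:
--             # 해당 토핑이 오른쪽에서 사라지면 종류 수 감소
--             right_kinds -= 1
--
--         # 현재 컷 위치에서 양쪽 종류 수가 같으면 카운트
--         if len(left) == right_kinds:
--             answer += 1
--
--     return answer
-- ===== SOURCE B (Python) =====
-- def _kinds(xs):
--     # distinct-count prefix table: out[i] = number of distinct values in xs[:i+1]
--     seen = set()
--     out = []
--     for t in xs:
--         seen.add(t)
--         out.append(len(seen))
--     return out
--
--
-- def solution(topping):
--     left_kinds = _kinds(topping)
--     right_kinds = _kinds(topping[::-1])[::-1]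
--     answer = 0
--     for i in range(len(topping) - 1):
--         if left_kinds[i] == right_kinds[i + 1]:
--             answer += 1
--     return answer
-- ===== Notes on version B (the rewrite author's own statement) =====
-- stated objective: alternative
-- what changed: Replaces A's single incremental cut sweep (a Counter decremented and a growing set maintained across one pass) with two independent precomputed distinct-count tables (prefix scan and reversed-suffix scan) compared in a final pass.
import Mathlib
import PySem

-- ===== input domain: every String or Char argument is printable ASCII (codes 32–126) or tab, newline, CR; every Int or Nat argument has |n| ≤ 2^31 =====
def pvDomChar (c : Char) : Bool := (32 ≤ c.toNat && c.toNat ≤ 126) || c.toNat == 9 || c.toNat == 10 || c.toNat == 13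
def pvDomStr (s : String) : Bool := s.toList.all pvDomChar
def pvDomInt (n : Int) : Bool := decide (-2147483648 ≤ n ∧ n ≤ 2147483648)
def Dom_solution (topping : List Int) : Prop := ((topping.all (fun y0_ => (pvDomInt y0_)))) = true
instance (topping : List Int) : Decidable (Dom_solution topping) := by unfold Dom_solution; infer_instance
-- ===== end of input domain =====

-- B replaces A's single incremental cut sweep (Counter + growing set) with two precomputed
-- distinct-count tables (prefix scan, reversed-suffix scan) compared in a final pass; same cost.


-- ===== PORT A =====
def solution (topping : List Int) : Int :=
  let right0 := PySem.Dict.counter topping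
  let st := (PySem.List.pyRange 0 ((topping.length : Int) - 1) 1).foldl
    (fun (st : PySem.Dict Int Int × Int × PySem.Set Int × Int) i =>
      let t := PySem.List.pyGetD topping i 0
      let left := PySem.Set.add st.2.2.1 t
      let right := st.1.modify t 0 (· - 1)
      let rk := if right.getD t 0 == 0 then st.2.1 - 1 else st.2.1
      let ans := if (PySem.Set.len left : Int) == rk then st.2.2.2 + 1 else st.2.2.2
      (right, rk, left, ans))
    (right0, (right0.size : Int), PySem.Set.empty, 0)
  st.2.2.2

-- ===== PORT B =====
def kindsTable (xs : List Int) : List Int :=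
  (xs.foldl
    (fun (st : PySem.Set Int × List Int) t =>
      let seen := PySem.Set.add st.1 t
      (seen, st.2 ++ [(PySem.Set.len seen : Int)]))
    (PySem.Set.empty, [])).2

def solution_alt (topping : List Int) : Int :=
  let leftKinds := kindsTable topping
  let rightKinds := (kindsTable topping.reverse).reverse
  (PySem.List.pyRange 0 ((topping.length : Int) - 1) 1).foldl
    (fun ans i =>
      if PySem.List.pyGetD leftKinds i 0 == PySem.List.pyGetD rightKinds (i + 1) 0
      then ans + 1 else ans) 0

-- ===== PRECONDITION & SPEC =====
def Spec_solution (topping : List Int) (out : Int) : Prop := out = solution_alt topping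
instance (topping : List Int) (out : Int) : Decidable (Spec_solution topping out) := by unfold Spec_solution; infer_instance

-- ===== CLAIM (what is proved, stated in full; the proofs are below) =====
def Claim_equal_solution : Prop := ∀ (topping : List Int), Dom_solution topping → Spec_solution topping (solution topping)

-- ===== LEMMAS AND PROOFS =====

-- number of distinct values in a list
def distCount (l : List Int) : Nat := (PySem.Set.ofList l).length

-- the cut condition at position k (cut between index k and k+1)
def condAt (tp : List Int) (k : Nat) : Bool :=
  distCount (tp.take (k + 1)) == distCount (tp.drop (k + 1))

theorem len_eq_of_mem_iff (s t : List Int) (hs : s.Nodup) (ht : t.Nodup)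
    (h : ∀ x, x ∈ s ↔ x ∈ t) : s.length = t.length :=
  ((List.perm_ext_iff_of_nodup hs ht).mpr h).length_eq

theorem distCount_congr (l l' : List Int) (h : ∀ x, x ∈ l ↔ x ∈ l') :
    distCount l = distCount l' := by
  exact len_eq_of_mem_iff _ _ (PySem.Set.nodup_ofList l) (PySem.Set.nodup_ofList l')
    (by intro x; simp [PySem.Set.mem_ofList, h x])

theorem distCount_reverse (l : List Int) : distCount l.reverse = distCount l :=
  distCount_congr _ _ (by intro x; simp)

theorem distCount_cons (t : Int) (l : List Int) :
    distCount (t :: l) = if t ∈ l then distCount l else distCount l + 1 := by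
  unfold distCount
  rw [PySem.Set.ofList_cons]
  by_cases h : t ∈ l
  · simp only [if_pos h, List.length_cons]
    have : (PySem.Set.discard (PySem.Set.ofList l) t).length + 1 = (PySem.Set.ofList l).length := by
      have := len_eq_of_mem_iff (t :: PySem.Set.discard (PySem.Set.ofList l) t) (PySem.Set.ofList l)
        (by
          refine List.nodup_cons.mpr ⟨?_, PySem.Set.nodup_discard _ _ (PySem.Set.nodup_ofList l)⟩
          simp [PySem.Set.mem_discard])
        (PySem.Set.nodup_ofList l)
        (by intro x; simp [PySem.Set.mem_discard, PySem.Set.mem_ofList]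
            constructor
            · rintro (rfl | ⟨hx, _⟩) <;> [exact h; exact hx]
            · intro hx; by_cases hxt : x = t; · left; exact hxt
              right; exact ⟨hx, hxt⟩)
      simpa using this
    omega
  · simp only [if_neg h]
    have : (PySem.Set.discard (PySem.Set.ofList l) t).length = (PySem.Set.ofList l).length :=
      len_eq_of_mem_iff _ _ (PySem.Set.nodup_discard _ _ (PySem.Set.nodup_ofList l))
        (PySem.Set.nodup_ofList l)
        (by intro x; simp [PySem.Set.mem_discard, PySem.Set.mem_ofList]
            intro hx; rintro rfl; exact h hx)
    simp [this]

-- ----- B side -----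

theorem kindsTable_aux (xs : List Int) : ∀ (s : PySem.Set Int) (out : List Int),
    (xs.foldl
      (fun (st : PySem.Set Int × List Int) t =>
        let seen := PySem.Set.add st.1 t
        (seen, st.2 ++ [(PySem.Set.len seen : Int)]))
      (s, out)).2
    = out ++ (List.range xs.length).map
        (fun k => ((PySem.Set.update s (xs.take (k + 1))).length : Int)) := by
  induction xs with
  | nil => simp
  | cons x xs ih =>
    intro s out
    simp only [List.foldl_cons, List.length_cons, List.range_succ_eq_map]
    rw [ih]
    simp [PySem.Set.update_cons, PySem.Set.update_nil, PySem.Set.len, List.map_map,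
      Function.comp_def]

theorem kindsTable_eq (xs : List Int) :
    kindsTable xs = (List.range xs.length).map (fun k => (distCount (xs.take (k + 1)) : Int)) := by
  unfold kindsTable
  rw [kindsTable_aux]
  simp only [distCount]
  congr 1

theorem solution_alt_eq (tp : List Int) :
    solution_alt tp = ((List.range (tp.length - 1)).countP (condAt tp) : Int) := by
  induction tp using List.reverseRecOn with
  | nil => decide
  | append_singleton front last _ =>
    have hunf : solution_alt (front ++ [last]) =
        (PySem.List.pyRange 0 (((front ++ [last]).length : Int) - 1) 1).foldl
          (fun ans i =>
            if PySem.List.pyGetD (kindsTable (front ++ [last])) i 0 ==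
               PySem.List.pyGetD ((kindsTable (front ++ [last]).reverse).reverse) (i + 1) 0
            then ans + 1 else ans) 0 := rfl
    rw [hunf]
    have hb : (((front ++ [last]).length : Int) - 1) = ((front.length : Nat) : Int) := by
      simp
    rw [hb, PySem.List.pyRange_zero_natCast, List.foldl_map]
    have hn : (front ++ [last]).length = front.length + 1 := by simp
    have hcond : ∀ (acc : Int), ∀ k ∈ List.range front.length,
        (if PySem.List.pyGetD (kindsTable (front ++ [last])) ((k : Nat) : Int) 0 ==
            PySem.List.pyGetD ((kindsTable (front ++ [last]).reverse).reverse) (((k : Nat) : Int) + 1) 0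
         then acc + 1 else acc)
        = (if condAt (front ++ [last]) k then acc + 1 else acc) := by
      intro acc k hk
      have hk' : k < front.length := List.mem_range.mp hk
      have hL : PySem.List.pyGetD (kindsTable (front ++ [last])) ((k : Nat) : Int) 0
          = (distCount ((front ++ [last]).take (k + 1)) : Int) := by
        rw [PySem.List.pyGetD_natCast, kindsTable_eq]
        rw [List.getD_eq_getElem _ _ (by simp; omega)]
        simp
      have hR : PySem.List.pyGetD ((kindsTable (front ++ [last]).reverse).reverse) (((k : Nat) : Int) + 1) 0
          = (distCount ((front ++ [last]).drop (k + 1)) : Int) := by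
        have hc1 : (((k : Nat) : Int) + 1) = (((k + 1 : Nat)) : Int) := by push_cast; ring
        rw [hc1, PySem.List.pyGetD_natCast, kindsTable_eq]
        have hlt : k + 1 < ((List.range (front ++ [last]).reverse.length).map
            (fun j => (distCount ((front ++ [last]).reverse.take (j + 1)) : Int))).reverse.length := by
          simp
          omega
        rw [List.getD_eq_getElem _ _ hlt]
        rw [List.getElem_reverse]
        simp only [List.getElem_map, List.getElem_range, List.length_map, List.length_range,
          List.length_reverse]
        have hidx : (front ++ [last]).length - 1 - (k + 1) + 1 = front.length - k := by
          simp [hn]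
          omega
        rw [hidx, List.take_reverse]
        rw [show (front ++ [last]).length - (front.length - k) = k + 1 by simp [hn]; omega]
        rw [distCount_reverse]
      rw [hL, hR]
      have hbeq : ((distCount ((front ++ [last]).take (k + 1)) : Int) ==
          (distCount ((front ++ [last]).drop (k + 1)) : Int)) = condAt (front ++ [last]) k := by
        by_cases h : distCount ((front ++ [last]).take (k + 1)) =
            distCount ((front ++ [last]).drop (k + 1)) <;> simp [condAt, h]
      rw [hbeq]
    rw [PySem.List.foldl_congr_mem _ _
      (fun (acc : Int) k => if condAt (front ++ [last]) k then acc + 1 else acc) _ hcond]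
    rw [PySem.List.foldl_if_add_one (condAt (front ++ [last]))]
    rw [hn]
    simp

-- ----- A side -----

-- reference count of good cuts: L already on the left, rem still to process, T the fixed tail
def cnt (L rem T : List Int) : Int :=
  match rem with
  | [] => 0
  | t :: r =>
      (if distCount (L ++ [t]) = distCount (r ++ T) then 1 else 0) + cnt (L ++ [t]) r T

def stepA :=
  (fun (st : PySem.Dict Int Int × Int × PySem.Set Int × Int) (t : Int) =>
      let left := PySem.Set.add st.2.2.1 t
      let right := st.1.modify t 0 (· - 1)
      let rk := if right.getD t 0 == 0 then st.2.1 - 1 else st.2.1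
      let ans := if (PySem.Set.len left : Int) == rk then st.2.2.2 + 1 else st.2.2.2
      (right, rk, left, ans))

theorem A_loop (rem : List Int) : ∀ (L T : List Int)
    (right : PySem.Dict Int Int) (rk ans : Int) (left : PySem.Set Int),
    (∀ t, right.getD t 0 = ((rem ++ T).count t : Int)) →
    rk = (distCount (rem ++ T) : Int) →
    left = PySem.Set.ofList L →
    (rem.foldl stepA (right, rk, left, ans)).2.2.2 = ans + cnt L rem T := by
  induction rem with
  | nil => intro L T right rk ans left _ _ _; simp [cnt]
  | cons t r ih =>
    intro L T right rk ans left hright hrk hleft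
    rw [List.foldl_cons]
    have hstep : stepA (right, rk, left, ans) t =
        (right.modify t 0 (· - 1),
         (if (right.modify t 0 (· - 1)).getD t 0 == 0 then rk - 1 else rk),
         PySem.Set.add left t,
         (if (PySem.Set.len (PySem.Set.add left t) : Int) ==
              (if (right.modify t 0 (· - 1)).getD t 0 == 0 then rk - 1 else rk)
          then ans + 1 else ans)) := rfl
    rw [hstep]
    have hget : ∀ u, (right.modify t 0 (· - 1)).getD u 0 = (((r ++ T).count u : Int)) := by
      intro u
      rw [PySem.Dict.getD_modify]
      by_cases hu : u = t
      · subst hu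
        rw [if_pos rfl, hright]
        simp
      · have hu' : ¬ t = u := fun h => hu h.symm
        rw [if_neg hu, hright]
        simp [hu']
    have hrk' : (if (right.modify t 0 (· - 1)).getD t 0 == 0 then rk - 1 else rk)
        = (distCount (r ++ T) : Int) := by
      rw [hget t, hrk]
      simp only [List.cons_append, distCount_cons]
      by_cases hm : t ∈ r ++ T
      · have hc : (r ++ T).count t ≠ 0 := fun h => (List.count_eq_zero.mp h) hm
        have hz : ¬ ((((r ++ T).count t : Int)) == 0) = true := by
          simp only [beq_iff_eq]
          exact_mod_cast hc
        rw [if_neg hz]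
        simp [hm]
      · have hc : (r ++ T).count t = 0 := List.count_eq_zero.mpr hm
        rw [if_neg hm, hc]
        simp only [Nat.cast_zero, beq_self_eq_true, if_true, Nat.cast_add, Nat.cast_one]
        ring
    have hlen : (PySem.Set.len (PySem.Set.add left t) : Int) = (distCount (L ++ [t]) : Int) := by
      rw [hleft, ← PySem.Set.ofList_append_singleton]
      simp [PySem.Set.len, distCount]
    have hans : (if (PySem.Set.len (PySem.Set.add left t) : Int) ==
              (if (right.modify t 0 (· - 1)).getD t 0 == 0 then rk - 1 else rk)
          then ans + 1 else ans)
        = ans + (if distCount (L ++ [t]) = distCount (r ++ T) then 1 else 0) := by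
      rw [hlen, hrk']
      by_cases h : distCount (L ++ [t]) = distCount (r ++ T) <;> simp [h]
    rw [hans, hrk']
    rw [ih (L ++ [t]) T _ _ _ _ hget rfl (by rw [hleft, ← PySem.Set.ofList_append_singleton])]
    simp [cnt]
    ring

theorem cnt_eq (rem : List Int) : ∀ (L T : List Int),
    cnt L rem T = (((List.range rem.length).countP
      (fun k => distCount (L ++ rem.take (k + 1)) == distCount (rem.drop (k + 1) ++ T))) : Int) := by
  induction rem with
  | nil => simp [cnt]
  | cons t r ih =>
    intro L T
    simp only [cnt, List.length_cons, List.range_succ_eq_map, List.countP_cons, ih (L ++ [t]) T,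
      List.countP_map]
    simp only [Function.comp_def, List.take_succ_cons, List.drop_succ_cons, List.take_zero,
      List.drop_zero]
    have h1 : ∀ k : ℕ, (distCount (L ++ t :: r.take (k+1)) == distCount (r.drop (k+1) ++ T))
        = (distCount ((L ++ [t]) ++ r.take (k+1)) == distCount (r.drop (k+1) ++ T)) := by
      intro k; simp
    simp only [h1]
    push_cast
    by_cases h : distCount (L ++ [t]) = distCount (r ++ T) <;> simp [h] <;> ring

theorem solution_eq (tp : List Int) :
    solution tp = ((List.range (tp.length - 1)).countP (condAt tp) : Int) := by
  induction tp using List.reverseRecOn with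
  | nil => decide
  | append_singleton front last _ =>
    have hunf : solution (front ++ [last]) =
        ((PySem.List.pyRange 0 (((front ++ [last]).length : Int) - 1) 1).foldl
          (fun st i => stepA st (PySem.List.pyGetD (front ++ [last]) i 0))
          (PySem.Dict.counter (front ++ [last]),
           ((PySem.Dict.counter (front ++ [last])).size : Int), PySem.Set.empty, 0)).2.2.2 := rfl
    rw [hunf]
    have hb : (((front ++ [last]).length : Int) - 1) = ((front.length : Nat) : Int) := by
      simp
    rw [hb]
    rw [PySem.List.foldl_congr_mem _ _
      (fun st i => stepA st (PySem.List.pyGetD front i 0)) _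
      (by
        intro acc i hi
        rcases PySem.List.mem_pyRange_one.mp hi with ⟨h0, h1⟩
        have h1' : i < ((front ++ [last]).length : Int) := by simp; omega
        congr 1
        rw [PySem.List.pyGetD_eq_getElem _ _ h0 h1',
            PySem.List.pyGetD_eq_getElem _ _ h0 (by exact_mod_cast h1)]
        rw [List.getElem_append_left])]
    rw [PySem.List.foldl_pyRange_zero_pyGetD' front (0 : Int) stepA]
    have hsz : (PySem.Dict.counter (front ++ [last])).size = distCount (front ++ [last]) := by
      have h1 : (PySem.Dict.counter (front ++ [last])).keys.length
          = (PySem.Dict.counter (front ++ [last])).size := by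
        simp [PySem.Dict.keys, PySem.Dict.size]
      rw [← h1, PySem.Dict.keys_counter]
      rfl
    rw [hsz]
    have he : (PySem.Set.empty : PySem.Set Int) = PySem.Set.ofList [] := rfl
    rw [he]
    rw [A_loop front [] [last] _ _ _ _
      (by intro t; rw [PySem.Dict.getD_counter])
      rfl
      rfl]
    rw [cnt_eq]
    have hlen2 : (front ++ [last]).length - 1 = front.length := by simp
    rw [hlen2, zero_add]
    congr 1
    apply List.countP_congr
    intro k hk
    have hk' : k < front.length := List.mem_range.mp hk
    simp only [condAt, List.nil_append]
    rw [List.take_append_of_le_length (by omega), List.drop_append_of_le_length (by omega)]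

-- ===== VERDICT (by name: the statement is the Claim_ definition above) =====
theorem solution_spec : Claim_equal_solution := by
  intro topping _
  unfold Spec_solution
  rw [solution_eq, solution_alt_eq]
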